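-- pv_equiv track=rewrite | github.com/alex-yudi/assembler-primitivo | montador.py | gera_cod_op
-- ===== SOURCE A (Python) =====
-- def gera_cod_op(inst):
--     fam_r = ["sll", "srl", "jr", "mfhi", "mflo", "mult", "multu", "div", "divu", "add", "addu", "sub", "subu", "and", "or","slt","sltu"]
--     mul = "mul"
--     fam_i = [
--         {
--         "nome":"beq",
--         "cod_op":"000100"
--         },
--         {
--         "nome":"bne",
--         "cod_op":"000101"
--         },
--         {
--         "nome":"addi",
--         "cod_op":"001000"
--         },
--         {
--         "nome":"addiu",
--         "cod_op":"001001"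
--         },
--         {
--         "nome":"slti",
--         "cod_op":"001010"
--         },
--         {
--         "nome":"sltiu",
--         "cod_op":"001011"
--         },
--         {
--         "nome":"andi",
--         "cod_op":"001100"
--         },
--         {
--         "nome":"ori",
--         "cod_op":"001101"
--         },
--         {
--         "nome":"lui",
--         "cod_op":"001111"
--         },
--         {
--         "nome":"lw",
--         "cod_op":"100011"
--         },
--         {
--         "nome":"sw",
--         "cod_op":"101011"
--         }
--     ]
--     fam_j = [
--         {
--         "nome":"j",
--         "cod_op":"000010"
--         },
--         {
--         "nome":"jal",
--         "cod_op":"000011"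
--         }
--     ]
--
--     if(inst in fam_r):
--         return "000000"
--
--     if(inst == mul):
--         return "011100"
--
--     for i in fam_i:
--         if(i['nome'] == inst):
--             return i["cod_op"]
--
--     for i in fam_j:
--         if(i['nome'] == inst):
--             return i["cod_op"]
-- ===== SOURCE B (Python) =====
-- # Binary search over one sorted (mnemonic, opcode) table instead of four sequential scans.
-- _TABLE = [
--     ("add", "000000"), ("addi", "001000"), ("addiu", "001001"), ("addu", "000000"),
--     ("and", "000000"), ("andi", "001100"), ("beq", "000100"), ("bne", "000101"),
--     ("div", "000000"), ("divu", "000000"), ("j", "000010"), ("jal", "000011"),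
--     ("jr", "000000"), ("lui", "001111"), ("lw", "100011"), ("mfhi", "000000"),
--     ("mflo", "000000"), ("mul", "011100"), ("mult", "000000"), ("multu", "000000"),
--     ("or", "000000"), ("ori", "001101"), ("sll", "000000"), ("slt", "000000"),
--     ("slti", "001010"), ("sltiu", "001011"), ("sltu", "000000"), ("srl", "000000"),
--     ("sub", "000000"), ("subu", "000000"), ("sw", "101011"),
-- ]
--
--
-- def gera_cod_op(inst):
--     lo, hi = 0, len(_TABLE)
--     while lo < hi:
--         mid = (lo + hi) // 2
--         if _TABLE[mid][0] < inst:
--             lo = mid + 1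
--         else:
--             hi = mid
--     if lo < len(_TABLE) and _TABLE[lo][0] == inst:
--         return _TABLE[lo][1]
--     return None
-- ===== Notes on version B (the rewrite author's own statement) =====
-- stated objective: alternative
-- what changed: Replaces A's membership test, special-case equality and two linear record scans by a hand-written binary search over a single sorted (mnemonic, opcode) table, with the same None fall-through for unknown mnemonics.
import Mathlib
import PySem

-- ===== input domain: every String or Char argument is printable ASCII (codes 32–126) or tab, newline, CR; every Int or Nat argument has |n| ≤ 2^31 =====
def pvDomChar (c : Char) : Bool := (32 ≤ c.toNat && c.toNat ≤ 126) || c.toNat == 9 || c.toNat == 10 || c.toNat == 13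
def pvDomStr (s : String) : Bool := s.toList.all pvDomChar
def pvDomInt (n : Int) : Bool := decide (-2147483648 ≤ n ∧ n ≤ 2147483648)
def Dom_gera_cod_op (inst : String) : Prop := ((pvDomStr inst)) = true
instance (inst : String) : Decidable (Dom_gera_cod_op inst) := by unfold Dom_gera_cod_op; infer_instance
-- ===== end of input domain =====

-- B replaces A's membership test, equality check and two linear record scans by a hand-written
-- binary search over one sorted (mnemonic, opcode) table (objective: alternative; same None fall-through).
-- ===== PORT A =====
def famR : List String := ["sll", "srl", "jr", "mfhi", "mflo", "mult", "multu", "div", "divu", "add", "addu", "sub", "subu", "and", "or", "slt", "sltu"]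

-- each Python record dict {"nome": …, "cod_op": …} is an association list; both keys are present
-- in every literal record, so Dict.get? is exact for i['nome'] / i['cod_op'] here
def famI : List (List (String × String)) := [
  [("nome", "beq"), ("cod_op", "000100")],
  [("nome", "bne"), ("cod_op", "000101")],
  [("nome", "addi"), ("cod_op", "001000")],
  [("nome", "addiu"), ("cod_op", "001001")],
  [("nome", "slti"), ("cod_op", "001010")],
  [("nome", "sltiu"), ("cod_op", "001011")],
  [("nome", "andi"), ("cod_op", "001100")],
  [("nome", "ori"), ("cod_op", "001101")],
  [("nome", "lui"), ("cod_op", "001111")],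
  [("nome", "lw"), ("cod_op", "100011")],
  [("nome", "sw"), ("cod_op", "101011")]]

def famJ : List (List (String × String)) := [
  [("nome", "j"), ("cod_op", "000010")],
  [("nome", "jal"), ("cod_op", "000011")]]

-- the Python 'for i in fam: if i['nome'] == inst: return i['cod_op']' loop
def pyLoopFam : List (List (String × String)) → String → Option String
  | [], _ => none
  | i :: rest, inst =>
    if (PySem.Dict.mk i).get? "nome" == some inst then (PySem.Dict.mk i).get? "cod_op"
    else pyLoopFam rest inst

def gera_cod_op (inst : String) : Option String :=
  if famR.contains inst then some "000000"
  else if inst == "mul" then some "011100"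
  else match pyLoopFam famI inst with
       | some v => some v
       | none => pyLoopFam famJ inst

-- ===== PORT B =====
-- Source B's sorted _TABLE, in order
def opTable : List (String × String) := [
  ("add", "000000"), ("addi", "001000"), ("addiu", "001001"), ("addu", "000000"),
  ("and", "000000"), ("andi", "001100"), ("beq", "000100"), ("bne", "000101"),
  ("div", "000000"), ("divu", "000000"), ("j", "000010"), ("jal", "000011"),
  ("jr", "000000"), ("lui", "001111"), ("lw", "100011"), ("mfhi", "000000"),
  ("mflo", "000000"), ("mul", "011100"), ("mult", "000000"), ("multu", "000000"),
  ("or", "000000"), ("ori", "001101"), ("sll", "000000"), ("slt", "000000"),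
  ("slti", "001010"), ("sltiu", "001011"), ("sltu", "000000"), ("srl", "000000"),
  ("sub", "000000"), ("subu", "000000"), ("sw", "101011")]

-- Source B's 'while lo < hi' binary-search loop, transcribed step for step ((lo+hi)//2 on
-- nonnegative Nat bounds is exactly Nat division); the fuel argument only
-- makes the recursion structural (|table|+1 steps always suffice since hi - lo shrinks each turn);
-- Python's str '<' is PySem.Chars.strLt (exact code-point lexicographic comparison)
def bsLoop : Nat → Nat → Nat → String → Nat
  | 0, lo, _, _ => lo
  | fuel + 1, lo, hi, inst =>
    if lo < hi then
      let mid := (lo + hi) / 2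
      if PySem.Chars.strLt (opTable.getD mid ("", "")).1.toList inst.toList then
        bsLoop fuel (mid + 1) hi inst
      else bsLoop fuel lo mid inst
    else lo

def gera_cod_op_alt (inst : String) : Option String :=
  let lo := bsLoop (opTable.length + 1) 0 opTable.length inst
  if lo < opTable.length && (opTable.getD lo ("", "")).1 == inst then
    some (opTable.getD lo ("", "")).2
  else none

-- ===== PRECONDITION & SPEC =====
def Spec_gera_cod_op (inst : String) (out : Option String) : Prop := out = gera_cod_op_alt inst
instance (inst : String) (out : Option String) : Decidable (Spec_gera_cod_op inst out) := by unfold Spec_gera_cod_op; infer_instance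

-- ===== CLAIM (what is proved, stated in full; the proofs are below) =====
def Claim_equal_gera_cod_op : Prop := ∀ (inst : String), Dom_gera_cod_op inst → Spec_gera_cod_op inst (gera_cod_op inst)

-- ===== LEMMAS AND PROOFS =====
-- all 31 mnemonics either program recognises
def opNames : List String := ["sll", "srl", "jr", "mfhi", "mflo", "mult", "multu", "div", "divu", "add", "addu", "sub", "subu", "and", "or", "slt", "sltu", "mul", "beq", "bne", "addi", "addiu", "slti", "sltiu", "andi", "ori", "lui", "lw", "sw", "j", "jal"]

-- unknown mnemonics fall through the binary search's final equality check to none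
theorem alt_miss (inst : String) (hmem : inst ∉ opNames) : gera_cod_op_alt inst = none := by
  unfold gera_cod_op_alt
  by_cases hlt : bsLoop (opTable.length + 1) 0 opTable.length inst < opTable.length
  · have hk : (opTable.getD (bsLoop (opTable.length + 1) 0 opTable.length inst) ("", "")).1 ≠ inst := by
      have hm : opTable.getD (bsLoop (opTable.length + 1) 0 opTable.length inst) ("", "") ∈ opTable := by
        rw [List.getD_eq_getElem _ _ hlt]; exact List.getElem_mem hlt
      have hall : ∀ p ∈ opTable, p.1 ∈ opNames := by decide
      intro e
      exact hmem (e ▸ hall _ hm)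
    simp only [List.getD] at hk
    simp [hk]
  · simp [hlt]

theorem gera_cod_op_spec : Claim_equal_gera_cod_op := by
  intro inst _
  unfold Spec_gera_cod_op
  by_cases hmem : inst ∈ opNames
  · fin_cases hmem <;> decide
  · rw [alt_miss inst hmem]
    have g0 : ¬ (inst = "sll") := fun e => hmem (by rw [e]; decide)
    have g1 : ¬ (inst = "srl") := fun e => hmem (by rw [e]; decide)
    have g2 : ¬ (inst = "jr") := fun e => hmem (by rw [e]; decide)
    have g3 : ¬ (inst = "mfhi") := fun e => hmem (by rw [e]; decide)
    have g4 : ¬ (inst = "mflo") := fun e => hmem (by rw [e]; decide)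
    have g5 : ¬ (inst = "mult") := fun e => hmem (by rw [e]; decide)
    have g6 : ¬ (inst = "multu") := fun e => hmem (by rw [e]; decide)
    have g7 : ¬ (inst = "div") := fun e => hmem (by rw [e]; decide)
    have g8 : ¬ (inst = "divu") := fun e => hmem (by rw [e]; decide)
    have g9 : ¬ (inst = "add") := fun e => hmem (by rw [e]; decide)
    have g10 : ¬ (inst = "addu") := fun e => hmem (by rw [e]; decide)
    have g11 : ¬ (inst = "sub") := fun e => hmem (by rw [e]; decide)
    have g12 : ¬ (inst = "subu") := fun e => hmem (by rw [e]; decide)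
    have g13 : ¬ (inst = "and") := fun e => hmem (by rw [e]; decide)
    have g14 : ¬ (inst = "or") := fun e => hmem (by rw [e]; decide)
    have g15 : ¬ (inst = "slt") := fun e => hmem (by rw [e]; decide)
    have g16 : ¬ (inst = "sltu") := fun e => hmem (by rw [e]; decide)
    have g17 : ¬ (inst = "mul") := fun e => hmem (by rw [e]; decide)
    have h18 : ¬ ("beq" = inst) := fun e => hmem (by rw [← e]; decide)
    have h19 : ¬ ("bne" = inst) := fun e => hmem (by rw [← e]; decide)
    have h20 : ¬ ("addi" = inst) := fun e => hmem (by rw [← e]; decide)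
    have h21 : ¬ ("addiu" = inst) := fun e => hmem (by rw [← e]; decide)
    have h22 : ¬ ("slti" = inst) := fun e => hmem (by rw [← e]; decide)
    have h23 : ¬ ("sltiu" = inst) := fun e => hmem (by rw [← e]; decide)
    have h24 : ¬ ("andi" = inst) := fun e => hmem (by rw [← e]; decide)
    have h25 : ¬ ("ori" = inst) := fun e => hmem (by rw [← e]; decide)
    have h26 : ¬ ("lui" = inst) := fun e => hmem (by rw [← e]; decide)
    have h27 : ¬ ("lw" = inst) := fun e => hmem (by rw [← e]; decide)
    have h28 : ¬ ("sw" = inst) := fun e => hmem (by rw [← e]; decide)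
    have h29 : ¬ ("j" = inst) := fun e => hmem (by rw [← e]; decide)
    have h30 : ¬ ("jal" = inst) := fun e => hmem (by rw [← e]; decide)
    simp [gera_cod_op, famR, famI, famJ, pyLoopFam, PySem.Dict.get?, List.contains, -List.elem_eq_contains, g0, g1, g2, g3, g4, g5, g6, g7, g8, g9, g10, g11, g12, g13, g14, g15, g16, g17, h18, h19, h20, h21, h22, h23, h24, h25, h26, h27, h28, h29, h30]
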